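-- pv_equiv track=rewrite | github.com/GeorgeFarrellx/PDF-Converter | Parsers/barclays-1.1.py | _truncate_after_summary_phrases
-- ===== SOURCE A (Python) =====
-- TRUNCATE_AFTER_PHRASES = [
--     "u commission charges",
--     "commission charges",
--     "u interest paid",
--     "interest paid",
--     "end balance",
-- ]
--
-- def _truncate_after_summary_phrases(s: str) -> str:
--     """Cut text at the first occurrence of known trailing summary phrases."""
--     low = s.lower()
--     cut = None
--     for ph in TRUNCATE_AFTER_PHRASES:
--         idx = low.find(ph)
--         if idx != -1:
--             cut = idx if cut is None else min(cut, idx)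
--     if cut is not None:
--         return s[:cut].strip()
--     return s.strip()
-- ===== SOURCE B (Python) =====
-- TRUNCATE_AFTER_PHRASES = [
--     "u commission charges",
--     "commission charges",
--     "u interest paid",
--     "interest paid",
--     "end balance",
-- ]
--
-- def _truncate_after_summary_phrases(s: str) -> str:
--     """Cut text at the leftmost position where any known summary phrase starts."""
--     low = s.lower()
--     for i in range(len(low)):
--         if any(low.startswith(ph, i) for ph in TRUNCATE_AFTER_PHRASES):
--             return s[:i].strip()
--     return s.strip()
-- ===== Notes on version B (the rewrite author's own statement) =====
-- stated objective: alternative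
-- what changed: Instead of running five separate find() scans and keeping a running minimum, B makes a single left-to-right scan over positions and stops at the first position where any phrase starts (leftmost-match = min of finds).
import Mathlib
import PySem

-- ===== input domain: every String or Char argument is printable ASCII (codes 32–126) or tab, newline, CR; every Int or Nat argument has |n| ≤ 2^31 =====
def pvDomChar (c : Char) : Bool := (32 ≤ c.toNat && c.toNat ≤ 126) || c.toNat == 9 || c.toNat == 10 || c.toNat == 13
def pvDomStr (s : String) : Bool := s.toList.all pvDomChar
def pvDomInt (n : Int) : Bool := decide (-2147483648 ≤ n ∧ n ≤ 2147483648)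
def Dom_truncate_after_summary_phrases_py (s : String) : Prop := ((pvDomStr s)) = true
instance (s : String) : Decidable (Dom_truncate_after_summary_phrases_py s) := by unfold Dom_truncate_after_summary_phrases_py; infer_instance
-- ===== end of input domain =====

-- B replaces A's five independent find() scans + running minimum by one left-to-right
-- positional scan that stops at the first position where any phrase starts (objective: alternative).

-- ===== PORT A =====
-- the module constant TRUNCATE_AFTER_PHRASES (as lowered char lists; the phrases are already lower case)
def pvPhrases : List (List Char) :=
  ["u commission charges".toList, "commission charges".toList,
   "u interest paid".toList, "interest paid".toList, "end balance".toList]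

-- the body of A's 'for ph in TRUNCATE_AFTER_PHRASES' loop
def pvStep (low : List Char) (cut : Option Int) (ph : List Char) : Option Int :=
  let idx := PySem.Chars.find low ph
  if idx ≠ -1 then
    match cut with
    | none => some idx
    | some c => some (min c idx)
  else cut

def truncate_after_summary_phrases_py (s : String) : String :=
  match pvPhrases.foldl (pvStep (PySem.Chars.lower s.toList)) none with
  | some c => String.ofList (PySem.Chars.strip (PySem.List.slice s.toList none (some c)))
  | none => String.ofList (PySem.Chars.strip s.toList)

-- ===== PORT B =====
-- any(low.startswith(ph, i) ...) : does some phrase start at the head of this suffix of low?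
def pvHit (ps : List (List Char)) (t : List Char) : Bool := ps.any (fun ph => ph.isPrefixOf t)

-- the 'for i in range(len(low))' scan, structurally over the suffixes of low
def pvFirstHit : List Char → Nat → Option Nat
  | [], _ => none
  | c :: rest, i => if pvHit pvPhrases (c :: rest) then some i else pvFirstHit rest (i + 1)

def truncate_after_summary_phrases_py_alt (s : String) : String :=
  match pvFirstHit (PySem.Chars.lower s.toList) 0 with
  | some i => String.ofList (PySem.Chars.strip (s.toList.take i))   -- s[:i].strip(), i ≥ 0
  | none => String.ofList (PySem.Chars.strip s.toList)

-- ===== PRECONDITION & SPEC =====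
def Spec_truncate_after_summary_phrases_py (s : String) (out : String) : Prop := out = truncate_after_summary_phrases_py_alt s
instance (s : String) (out : String) : Decidable (Spec_truncate_after_summary_phrases_py s out) := by unfold Spec_truncate_after_summary_phrases_py; infer_instance

-- ===== CLAIM (what is proved, stated in full; the proofs are below) =====
def Claim_equal_truncate_after_summary_phrases_py : Prop := ∀ (s : String), Dom_truncate_after_summary_phrases_py s → Spec_truncate_after_summary_phrases_py s (truncate_after_summary_phrases_py s)

-- ===== LEMMAS AND PROOFS =====

-- "o is the least position in L at which some phrase of ps starts" (none: no such position)
def pvLeast (L : List Char) (ps : List (List Char)) : Option Int → Prop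
  | none => ∀ m, pvHit ps (L.drop m) = false
  | some c => 0 ≤ c ∧ pvHit ps (L.drop c.toNat) = true ∧ ∀ m < c.toNat, pvHit ps (L.drop m) = false

lemma pvHit_append (ps : List (List Char)) (ph : List Char) (t : List Char) :
    pvHit (ps ++ [ph]) t = (pvHit ps t || ph.isPrefixOf t) := by
  simp [pvHit]

lemma pvStep_least (L : List Char) (ps0 : List (List Char)) (acc : Option Int) (ph : List Char)
    (h : pvLeast L ps0 acc) : pvLeast L (ps0 ++ [ph]) (pvStep L acc ph) := by
  unfold pvStep
  by_cases hf : PySem.Chars.find L ph = -1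
  · -- ph does not occur in L at all
    have hninf : ¬ ph <:+: L := (PySem.Chars.find_eq_neg_one_iff L ph).mp hf
    have hno : ∀ m, ph.isPrefixOf (L.drop m) = false := by
      intro m
      cases hpf : ph.isPrefixOf (L.drop m) with
      | false => rfl
      | true =>
        exact absurd ((PySem.Chars.isIn_iff_infix ph L).mp
          ((PySem.Chars.exists_prefix_drop_iff_isIn (sub := ph) (s := L)).mp
            ⟨m, (List.isPrefixOf_iff_prefix).mp hpf⟩)) hninf
    simp only [hf, ne_eq, not_true_eq_false, if_false]
    cases acc with
    | none =>
      intro m; rw [pvHit_append, h m, hno m]; rfl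
    | some a =>
      obtain ⟨ha0, hhit, hmin⟩ := h
      refine ⟨ha0, ?_, ?_⟩
      · rw [pvHit_append, hhit]; rfl
      · intro m hm; rw [pvHit_append, hmin m hm, hno m]; rfl
  · -- ph occurs; find points at its first occurrence
    have hinf : ph <:+: L := (PySem.Chars.find_ne_neg_one_iff L ph).mp hf
    have hpos : 0 ≤ PySem.Chars.find L ph := (PySem.Chars.find_nonneg_iff L ph).mpr hinf
    obtain ⟨hprefix, hfirst⟩ := PySem.Chars.find_spec (s := L) (sub := ph) hpos
    have hpreB : ph.isPrefixOf (L.drop (PySem.Chars.find L ph).toNat) = true :=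
      (List.isPrefixOf_iff_prefix).mpr hprefix
    have hfirstB : ∀ m < (PySem.Chars.find L ph).toNat, ph.isPrefixOf (L.drop m) = false := by
      intro m hm
      cases hpf : ph.isPrefixOf (L.drop m) with
      | false => rfl
      | true => exact absurd ((List.isPrefixOf_iff_prefix).mp hpf) (hfirst m hm)
    simp only [hf, ne_eq, not_false_eq_true, if_true]
    cases acc with
    | none =>
      refine ⟨hpos, ?_, ?_⟩
      · rw [pvHit_append, hpreB]; simp
      · intro m hm; rw [pvHit_append, h m, hfirstB m hm]; rfl
    | some a =>
      obtain ⟨ha0, hhit, hmin⟩ := h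
      refine ⟨le_min ha0 hpos, ?_, ?_⟩
      · rcases le_or_gt a (PySem.Chars.find L ph) with hle | hlt
        · rw [min_eq_left hle, pvHit_append, hhit]; rfl
        · rw [min_eq_right (le_of_lt hlt), pvHit_append, hpreB]; simp
      · intro m hm
        have hmle1 := Int.toNat_le_toNat (min_le_left a (PySem.Chars.find L ph))
        have hmle2 := Int.toNat_le_toNat (min_le_right a (PySem.Chars.find L ph))
        rw [pvHit_append, hmin m (by omega), hfirstB m (by omega)]; rfl

lemma pvFoldl_least (L : List Char) :
    ∀ (ps ps0 : List (List Char)) (acc : Option Int),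
      pvLeast L ps0 acc → pvLeast L (ps0 ++ ps) (ps.foldl (pvStep L) acc) := by
  intro ps
  induction ps with
  | nil => intro ps0 acc h; simpa using h
  | cons ph ps ih =>
    intro ps0 acc h
    have := ih (ps0 ++ [ph]) (pvStep L acc ph) (pvStep_least L ps0 acc ph h)
    simpa [List.append_assoc] using this

lemma pvFirstHit_spec :
    ∀ (l : List Char) (i : Nat),
      (∀ j, pvFirstHit l i = some j →
        ∃ k, j = i + k ∧ pvHit pvPhrases (l.drop k) = true ∧
          ∀ m < k, pvHit pvPhrases (l.drop m) = false) ∧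
      (pvFirstHit l i = none → ∀ m, pvHit pvPhrases (l.drop m) = false) := by
  intro l
  induction l with
  | nil =>
    intro i
    constructor
    · intro j hj; simp [pvFirstHit] at hj
    · intro _ m; simp only [List.drop_nil]; decide
  | cons c rest ih =>
    intro i
    constructor
    · intro j hj
      by_cases hc : pvHit pvPhrases (c :: rest) = true
      · refine ⟨0, ?_, ?_, ?_⟩
        · simp [pvFirstHit, hc] at hj; omega
        · simpa using hc
        · intro m hm; omega
      · have hc' : pvHit pvPhrases (c :: rest) = false := Bool.eq_false_iff.mpr hc
        have hj' : pvFirstHit rest (i + 1) = some j := by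
          simpa [pvFirstHit, hc'] using hj
        obtain ⟨k, hk, hhit, hmin⟩ := (ih (i + 1)).1 j hj'
        refine ⟨k + 1, by omega, by simpa using hhit, ?_⟩
        intro m hm
        cases m with
        | zero => simpa using hc'
        | succ m' => simpa using hmin m' (by omega)
    · intro hn m
      by_cases hc : pvHit pvPhrases (c :: rest) = true
      · simp [pvFirstHit, hc] at hn
      · have hc' : pvHit pvPhrases (c :: rest) = false := Bool.eq_false_iff.mpr hc
        have hn' : pvFirstHit rest (i + 1) = none := by
          simpa [pvFirstHit, hc'] using hn
        cases m with
        | zero => simpa using hc'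
        | succ m' => simpa using (ih (i + 1)).2 hn' m'

-- ===== VERDICT (by name: the statement is the Claim_ definition above) =====
theorem truncate_after_summary_phrases_py_spec : Claim_equal_truncate_after_summary_phrases_py := by
  intro s _
  unfold Spec_truncate_after_summary_phrases_py
  unfold truncate_after_summary_phrases_py truncate_after_summary_phrases_py_alt
  set L := PySem.Chars.lower s.toList with hL
  have hA : pvLeast L pvPhrases (pvPhrases.foldl (pvStep L) none) := by
    have h0 : pvLeast L [] none := by intro m; simp [pvHit]
    simpa using pvFoldl_least L pvPhrases [] none h0
  rcases hFA : pvPhrases.foldl (pvStep L) none with _ | c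
  · rcases hFB : pvFirstHit L 0 with _ | j
    · rfl
    · exfalso
      obtain ⟨k, hk, hhit, _⟩ := (pvFirstHit_spec L 0).1 j hFB
      rw [hFA] at hA
      exact absurd hhit (by simp [hA k])
  · rcases hFB : pvFirstHit L 0 with _ | j
    · exfalso
      rw [hFA] at hA
      obtain ⟨hc0, hhit, _⟩ := hA
      have := (pvFirstHit_spec L 0).2 hFB c.toNat
      simp [this] at hhit
    · rw [hFA] at hA
      obtain ⟨hc0, hhitA, hminA⟩ := hA
      obtain ⟨k, hk, hhitB, hminB⟩ := (pvFirstHit_spec L 0).1 j hFB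
      have hkj : j = k := by omega
      subst hkj
      have heq : c.toNat = j := by
        rcases Nat.lt_trichotomy c.toNat j with h | h | h
        · exact absurd hhitA (by simp [hminB c.toNat h])
        · exact h
        · exact absurd hhitB (by simp [hminA j h])
      have hc : c = (j : Int) := by omega
      subst hc
      have hsl := PySem.List.slice_to s.toList hc0
      simp [hsl]
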